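-- pv_equiv track=rewrite | github.com/Darokahn/Graphing | postfix.py | isPrior
-- ===== SOURCE A (Python) =====
-- def isPrior(item, compare):
--     priorityList = ("neg",), ("(", ")"), ("pow",), ("mul", "truediv"), ("add", "sub")
--     for values in priorityList:
--         if item in values:
--             return compare not in values
--         if compare in values:
--                 return False
--     return False
-- ===== SOURCE B (Python) =====
-- PRECEDENCE = {"neg": 0, "(": 1, ")": 1, "pow": 2, "mul": 3, "truediv": 3, "add": 4, "sub": 4}
--
-- def isPrior(item, compare):
--     if item not in PRECEDENCE:
--         return False
--     if compare not in PRECEDENCE: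
--         return True
--     return PRECEDENCE[item] < PRECEDENCE[compare]
-- ===== Notes on version B (the rewrite author's own statement) =====
-- stated objective: simpler
-- what changed: Replaces the ordered linear scan over precedence groups with a precomputed operator->rank dict and a single integer comparison.
import Mathlib
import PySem

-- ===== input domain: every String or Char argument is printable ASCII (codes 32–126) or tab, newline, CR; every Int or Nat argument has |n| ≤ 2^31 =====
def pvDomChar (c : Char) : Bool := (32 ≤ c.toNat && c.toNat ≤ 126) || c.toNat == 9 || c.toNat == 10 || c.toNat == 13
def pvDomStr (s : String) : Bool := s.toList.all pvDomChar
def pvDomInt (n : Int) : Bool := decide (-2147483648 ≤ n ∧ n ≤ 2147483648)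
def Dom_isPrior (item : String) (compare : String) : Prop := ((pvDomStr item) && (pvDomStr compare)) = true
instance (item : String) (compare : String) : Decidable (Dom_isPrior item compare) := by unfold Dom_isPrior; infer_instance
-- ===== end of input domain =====

-- B replaces A's ordered scan over precedence groups with a rank dict and one integer comparison (simpler).
-- ===== PORT A =====
-- the for-loop over priorityList, with its two early returns, as structural recursion
def isPriorLoop (item : String) (compare : String) : List (List String) → Bool
  | [] => false
  | values :: rest =>
    if values.contains item then !(values.contains compare)
    else if values.contains compare then false
    else isPriorLoop item compare rest

def isPrior (item : String) (compare : String) : Bool :=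
  isPriorLoop item compare [["neg"], ["(", ")"], ["pow"], ["mul", "truediv"], ["add", "sub"]]

-- ===== PORT B =====
def precedenceDict : PySem.Dict String Int :=
  PySem.Dict.ofList [("neg", 0), ("(", 1), (")", 1), ("pow", 2), ("mul", 3), ("truediv", 3), ("add", 4), ("sub", 4)]

def isPrior_alt (item : String) (compare : String) : Bool :=
  match precedenceDict.get? item with
  | none => false
  | some pi =>
    match precedenceDict.get? compare with
    | none => true
    | some pc => decide (pi < pc)

-- ===== PRECONDITION & SPEC =====
def Spec_isPrior (item : String) (compare : String) (out : Bool) : Prop := out = isPrior_alt item compare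
instance (item : String) (compare : String) (out : Bool) : Decidable (Spec_isPrior item compare out) := by unfold Spec_isPrior; infer_instance

-- ===== CLAIM (what is proved, stated in full; the proofs are below) =====
def Claim_equal_isPrior : Prop := ∀ (item : String) (compare : String), Dom_isPrior item compare → Spec_isPrior item compare (isPrior item compare)

-- ===== LEMMAS AND PROOFS =====

-- ===== VERDICT (by name: the statement is the Claim_ definition above) =====
lemma precDict_eq : precedenceDict = PySem.Dict.mk
    [("neg", 0), ("(", 1), (")", 1), ("pow", 2), ("mul", 3), ("truediv", 3), ("add", 4), ("sub", 4)] := by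
  decide

-- Case-split each string on membership in the 8 operator names; every branch is then closed by computation.
theorem isPrior_spec : Claim_equal_isPrior := by
  unfold Claim_equal_isPrior
  intro item compare _
  unfold Spec_isPrior
  have split8 : ∀ s : String, s = "neg" ∨ s = "(" ∨ s = ")" ∨ s = "pow" ∨ s = "mul" ∨
      s = "truediv" ∨ s = "add" ∨ s = "sub" ∨
      (s ≠ "neg" ∧ s ≠ "(" ∧ s ≠ ")" ∧ s ≠ "pow" ∧ s ≠ "mul" ∧ s ≠ "truediv" ∧ s ≠ "add" ∧ s ≠ "sub" ∧
       "neg" ≠ s ∧ "(" ≠ s ∧ ")" ≠ s ∧ "pow" ≠ s ∧ "mul" ≠ s ∧ "truediv" ≠ s ∧ "add" ≠ s ∧ "sub" ≠ s) := by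
    intro s; by_cases h1 : s = "neg" <;> by_cases h2 : s = "(" <;> by_cases h3 : s = ")" <;>
      by_cases h4 : s = "pow" <;> by_cases h5 : s = "mul" <;> by_cases h6 : s = "truediv" <;>
      by_cases h7 : s = "add" <;> by_cases h8 : s = "sub" <;> simp_all <;> exact ⟨fun h => h1 h.symm, fun h => h2 h.symm, fun h => h3 h.symm, fun h => h4 h.symm, fun h => h5 h.symm, fun h => h6 h.symm, fun h => h7 h.symm, fun h => h8 h.symm⟩
  rcases split8 item with hi|hi|hi|hi|hi|hi|hi|hi|⟨i1,i2,i3,i4,i5,i6,i7,i8,i1',i2',i3',i4',i5',i6',i7',i8'⟩ <;>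
    rcases split8 compare with hc|hc|hc|hc|hc|hc|hc|hc|⟨c1,c2,c3,c4,c5,c6,c7,c8,c1',c2',c3',c4',c5',c6',c7',c8'⟩ <;>
      subst_vars <;>
        first
          | decide
          | simp_all [isPrior, isPriorLoop, isPrior_alt, precDict_eq, PySem.Dict.get?,
              List.contains_eq_mem]
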